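-- pv_equiv track=rewrite | github.com/fujimotos/TinyFastSS | fastss.py | indexkeys
-- ===== SOURCE A (Python) =====
-- import itertools
--
-- def indexkeys(word, max_dist):
--     """Return the set of index keys ("variants") of a word.
--
--     >>> indexkeys('aiu', 1)
--     {'aiu', 'iu', 'au', 'ai'}
--     """
--
--     res = set()
--     wordlen = len(word)
--     limit = min(max_dist, wordlen) + 1
--
--     for dist in range(limit):
--         variants = itertools.combinations(word, wordlen-dist)
--
--         for variant in variants:
--             res.add(''.join(variant))
--
--     return res
-- ===== SOURCE B (Python) =====
-- def indexkeys(word, max_dist):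
--     n = len(word)
--     limit = min(max_dist, n) + 1
--     if limit <= 0:
--         return set()
--     # levels[j] = all length-(m-j) subsequences of the current suffix (length m),
--     # built by one dynamic-programming pass over the word from the last char to the first.
--     levels = [['']]
--     for x in reversed(word):
--         prev = levels
--         levels = []
--         for j in range(min(len(prev) + 1, limit)):
--             row = [x + t for t in prev[j]] if j < len(prev) else []
--             if j > 0:
--                 row = row + prev[j - 1]
--             levels.append(row)
--     res = set()
--     for row in levels:
--         res.update(row)
--     return res
-- ===== Notes on version B (the rewrite author's own statement) =====
-- stated objective: alternative
-- what changed: Replaces the per-distance itertools.combinations enumeration with a single dynamic-programming pass over the word that builds all deletion levels (lengths n..n-d) at once, reusing each level to derive the next.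
import Mathlib
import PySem

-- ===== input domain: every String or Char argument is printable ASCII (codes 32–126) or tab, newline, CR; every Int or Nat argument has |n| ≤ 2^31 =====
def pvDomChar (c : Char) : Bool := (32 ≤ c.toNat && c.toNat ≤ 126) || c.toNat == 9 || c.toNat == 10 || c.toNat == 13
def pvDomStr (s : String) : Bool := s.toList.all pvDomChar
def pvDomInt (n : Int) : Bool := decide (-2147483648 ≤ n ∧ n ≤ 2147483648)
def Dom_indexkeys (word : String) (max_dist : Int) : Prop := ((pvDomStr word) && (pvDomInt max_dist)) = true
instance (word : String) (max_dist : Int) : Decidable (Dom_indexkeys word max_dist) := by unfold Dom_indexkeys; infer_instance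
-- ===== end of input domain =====

-- B replaces the per-distance enumeration of itertools.combinations by one dynamic-programming
-- pass over the word that derives all deletion levels at once (objective: alternative).

-- ===== PORT A =====
-- Hand-port of itertools.combinations(word, k): all length-k subsequences,
-- in the same lexicographic (by picked indices) order as itertools yields them; exact.
def pyCombs : List Char → Nat → List (List Char)
  | _, 0 => [[]]
  | [], _ + 1 => []
  | x :: xs, k + 1 => (pyCombs xs k).map (x :: ·) ++ pyCombs xs (k + 1)

-- inside the loop dist ≤ limit-1 ≤ wordlen, so (wordlen - dist).toNat is exact
def indexkeys (word : String) (max_dist : Int) : List String :=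
  let wordlen : Int := PySem.Str.len word
  let limit : Int := min max_dist wordlen + 1
  (PySem.List.pyRange 0 limit 1).foldl
    (fun res dist =>
      (pyCombs word.toList (wordlen - dist).toNat).foldl
        (fun res variant => PySem.Set.add res (String.mk variant)) res)
    []

-- ===== PORT B =====
-- one DP step of Source B: new level j = [x + t for t in prev[j]] (+ prev[j-1] if j > 0)
def altStep (limit : Nat) (prev : List (List (List Char))) (x : Char) : List (List (List Char)) :=
  (List.range (min (prev.length + 1) limit)).map
    (fun j =>
      (if j < prev.length then (prev.getD j []).map (x :: ·) else []) ++
      (if 0 < j then prev.getD (j - 1) [] else []))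

def indexkeys_alt (word : String) (max_dist : Int) : List String :=
  let n : Int := PySem.Str.len word
  let limit : Int := min max_dist n + 1
  if limit ≤ 0 then []
  else
    let levels := word.toList.reverse.foldl (altStep limit.toNat) [[[]]]
    levels.foldl (fun res row => PySem.Set.update res (row.map String.mk)) []

-- ===== PRECONDITION & SPEC =====
def Spec_indexkeys (word : String) (max_dist : Int) (out : List String) : Prop := out = indexkeys_alt word max_dist
instance (word : String) (max_dist : Int) (out : List String) : Decidable (Spec_indexkeys word max_dist out) := by unfold Spec_indexkeys; infer_instance

-- ===== CLAIM (what is proved, stated in full; the proofs are below) =====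
def Claim_equal_indexkeys : Prop := ∀ (word : String) (max_dist : Int), Dom_indexkeys word max_dist → Spec_indexkeys word max_dist (indexkeys word max_dist)

-- ===== LEMMAS AND PROOFS =====

theorem pyCombs_eq_nil_of_lt (xs : List Char) (k : Nat) (h : xs.length < k) :
    pyCombs xs k = [] := by
  induction xs generalizing k with
  | nil => cases k with
    | zero => omega
    | succ k => rfl
  | cons x xs ih =>
    cases k with
    | zero => omega
    | succ k =>
      simp only [pyCombs]
      rw [ih k (by simpa using Nat.lt_of_succ_lt_succ h), ih (k+1) (by simp at h ⊢; omega)]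
      simp

-- the DP invariant: after folding the reversed suffix s, level j holds pyCombs s (|s| - j)
theorem altFold_eq (L : Nat) (hL : 1 ≤ L) (s : List Char) :
    s.reverse.foldl (altStep L) [[[]]] =
      (List.range (min (s.length + 1) L)).map (fun j => pyCombs s (s.length - j)) := by
  induction s with
  | nil =>
    simp [Nat.min_eq_left hL, List.range_succ, pyCombs]
  | cons x t ih =>
    rw [List.reverse_cons, List.foldl_append, ih]
    simp only [List.foldl_cons, List.foldl_nil, altStep, List.length_map, List.length_range]
    have hm : min (min (t.length + 1) L + 1) L = min (t.length + 1 + 1) L := by omega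
    rw [hm]
    apply List.map_congr_left
    intro j hj
    rw [List.mem_range] at hj
    have hgetD : ∀ i, ((List.range (min (t.length + 1) L)).map
        (fun j => pyCombs t (t.length - j))).getD i [] =
        if i < min (t.length + 1) L then pyCombs t (t.length - i) else [] := by
      intro i
      by_cases h : i < min (t.length + 1) L
      · rw [List.getD_eq_getElem _ _ (by simpa using h)]
        simp [h]
      · rw [List.getD_eq_default _ _ (by simpa using Nat.le_of_not_lt h)]
        simp [h]
    rw [hgetD]
    by_cases hj0 : 0 < j
    · rw [hgetD]
      have hjm : j - 1 < min (t.length + 1) L := by omega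
      simp only [hjm, if_true]
      by_cases hjlt : j < min (t.length + 1) L
      · -- interior level: exactly the pyCombs cons equation
        simp only [hjlt, if_true, hj0, if_true]
        have hk : (x :: t).length - j = (t.length - j) + 1 := by simp; omega
        rw [hk]
        simp only [pyCombs]
        have h2 : t.length - (j - 1) = t.length - j + 1 := by omega
        rw [h2]
      · -- j = min (t.length+1) L, only possible when min = t.length+1 < L
        have hj1 : j = t.length + 1 := by omega
        simp only [hjlt, if_false, hj0, if_true, List.nil_append]
        have h1 : (x :: t).length - j = 0 := by simp; omega
        have h2 : t.length - (j - 1) = 0 := by omega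
        rw [h1, h2]; simp [pyCombs]
    · have hj0' : j = 0 := by omega
      subst hj0'
      have h0 : 0 < min (t.length + 1) L := by omega
      simp only [h0, if_true, Nat.sub_zero, lt_irrefl, if_false, List.append_nil,
        List.length_cons, pyCombs]
      rw [pyCombs_eq_nil_of_lt t (t.length + 1) (by omega)]
      simp

theorem indexkeys_spec_aux (word : String) (max_dist : Int) :
    indexkeys word max_dist = indexkeys_alt word max_dist := by
  unfold indexkeys indexkeys_alt
  simp only [PySem.Str.len_eq]
  set cs : List Char := word.toList with hcs
  set n : Nat := cs.length with hn
  set limit : Int := min max_dist (n : Int) + 1 with hlimit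
  by_cases hle : limit ≤ 0
  · rw [PySem.List.pyRange_one_eq_nil (by omega)]
    simp [hle]
  · have h1 : (1 : Int) ≤ limit := by omega
    have hK : limit.toNat ≤ n + 1 := by omega
    rw [if_neg hle]
    rw [altFold_eq limit.toNat (by omega) cs]
    rw [Nat.min_eq_right (by omega)]
    rw [PySem.List.pyRange_one (a := 0) (b := limit)]
    simp only [zero_add, Int.sub_zero]
    rw [List.foldl_map, List.foldl_map]
    apply List.foldl_ext
    intro acc j hj
    rw [List.mem_range] at hj
    have hsub : ((n : Int) - (j : Int)).toNat = n - j := by omega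
    rw [hsub, PySem.Set.update_map_eq_foldl_add]

-- ===== VERDICT (by name: the statement is the Claim_ definition above) =====
theorem indexkeys_spec : Claim_equal_indexkeys := by
  intro word max_dist _
  unfold Spec_indexkeys
  exact indexkeys_spec_aux word max_dist
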